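-- pv_equiv track=rewrite | github.com/JordenDan/LeetCodePython | 0001~0050/0036_有效的数独/isValidSudoku.py | isInvalidItem
-- ===== SOURCE A (Python) =====
-- def isInvalidItem(checkItem):
--     valSet = set()
--     for item in checkItem:
--         if item == ".":
--             continue
--         if item in valSet:
--             return True
--         valSet.add(item)
-- ===== SOURCE B (Python) =====
-- def isInvalidItem(checkItem):
--     vals = sorted(v for v in checkItem if v != ".")
--     for x, y in zip(vals, vals[1:]):
--         if x == y:
--             return True
-- ===== Notes on version B (the rewrite author's own statement) =====
-- stated objective: alternative
-- what changed: Replaces A's hash-set early-exit scan by a sort-then-adjacent-compare algorithm: sort the non-'.' entries and report a duplicate iff two equal values end up adjacent, using no set at all.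
import Mathlib
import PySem

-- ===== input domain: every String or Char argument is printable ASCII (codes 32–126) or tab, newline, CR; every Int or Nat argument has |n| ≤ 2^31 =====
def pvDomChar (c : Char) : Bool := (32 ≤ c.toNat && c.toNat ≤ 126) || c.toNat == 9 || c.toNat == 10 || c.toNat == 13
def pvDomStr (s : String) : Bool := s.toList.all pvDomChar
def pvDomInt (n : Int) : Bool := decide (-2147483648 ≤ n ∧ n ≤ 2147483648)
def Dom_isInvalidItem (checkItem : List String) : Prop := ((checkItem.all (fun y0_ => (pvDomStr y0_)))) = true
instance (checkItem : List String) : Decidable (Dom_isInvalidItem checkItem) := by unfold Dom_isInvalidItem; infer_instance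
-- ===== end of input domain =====

-- B replaces A's hash-set early-exit scan with sort-then-adjacent-compare (no set; same result, O(n log n)).


-- ===== PORT A =====
-- the 'for item in checkItem' loop with its 'valSet' accumulator and early 'return True'
def isInvalidItemLoop : List String → PySem.Set String → Option Bool
  | [], _ => none
  | item :: rest, valSet =>
    if item == "." then isInvalidItemLoop rest valSet
    else if PySem.Set.contains valSet item then some true
    else isInvalidItemLoop rest (PySem.Set.add valSet item)

def isInvalidItem (checkItem : List String) : Option Bool :=
  isInvalidItemLoop checkItem PySem.Set.empty

-- ===== PORT B =====
-- the 'for x, y in zip(vals, vals[1:])' loop with its early 'return True'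
def isInvalidItemAdjLoop : List (String × String) → Option Bool
  | [] => none
  | (x, y) :: rest => if x == y then some true else isInvalidItemAdjLoop rest

def isInvalidItem_alt (checkItem : List String) : Option Bool :=
  let vals := PySem.List.sorted (checkItem.filter (fun v => !(v == "."))) (fun v => v) false
  isInvalidItemAdjLoop (vals.zip vals.tail)

-- ===== PRECONDITION & SPEC =====
def Spec_isInvalidItem (checkItem : List String) (out : Option Bool) : Prop := out = isInvalidItem_alt checkItem
instance (checkItem : List String) (out : Option Bool) : Decidable (Spec_isInvalidItem checkItem out) := by unfold Spec_isInvalidItem; infer_instance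

-- ===== CLAIM (what is proved, stated in full; the proofs are below) =====
def Claim_equal_isInvalidItem : Prop := ∀ (checkItem : List String), Dom_isInvalidItem checkItem → Spec_isInvalidItem checkItem (isInvalidItem checkItem)

-- ===== LEMMAS AND PROOFS =====

theorem add_not_mem_eq {x : String} {s : PySem.Set String} (h : x ∉ s) :
    PySem.Set.add s x = s ++ [x] := by simp [PySem.Set.add, h]

-- A's loop decides Nodup of the set prefix ++ the filtered remainder
theorem loop_eq (xs : List String) (s : PySem.Set String) (hs : s.Nodup) :
    isInvalidItemLoop xs s =
      if (s ++ xs.filter (fun c => !(c == "."))).Nodup then none else some true := by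
  induction xs generalizing s with
  | nil => simp [isInvalidItemLoop, hs]
  | cons x xs ih =>
    by_cases hd : x == "."
    · simp [isInvalidItemLoop, hd, ih s hs]
    · have hfc : (x :: xs).filter (fun c => !(c == ".")) =
          x :: xs.filter (fun c => !(c == ".")) := by simp [hd]
      by_cases hc : x ∈ s
      · have hnn : ¬ (s ++ x :: xs.filter (fun c => !(c == "."))).Nodup := by
          intro h
          exact (List.nodup_append.mp h).2.2 x hc x (by simp) rfl
        simp [isInvalidItemLoop, hd, hc, hfc, hnn]
      · have hcc : PySem.Set.contains s x = false := by
          simp [PySem.Set.contains]; exact hc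
        have hs' : (s ++ [x]).Nodup := by
          rw [List.nodup_append]
          refine ⟨hs, by simp, ?_⟩
          intro a ha b hb
          simp at hb; subst hb
          exact fun hab => hc (hab ▸ ha)
        have hassoc : (s ++ [x]) ++ xs.filter (fun c => !(c == ".")) =
            s ++ (x :: xs).filter (fun c => !(c == ".")) := by rw [hfc]; simp
        rw [show isInvalidItemLoop (x :: xs) s =
            isInvalidItemLoop xs (PySem.Set.add s x) by
          simp [isInvalidItemLoop, hd, hc]]
        rw [add_not_mem_eq hc, ih _ hs', hassoc]

-- B's adjacent scan on a ≤-sorted list decides Nodup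
theorem adj_eq (s : List String) (hs : s.Pairwise (fun a b => a ≤ b)) :
    isInvalidItemAdjLoop (s.zip s.tail) =
      if s.Nodup then none else some true := by
  induction s with
  | nil => simp [isInvalidItemAdjLoop]
  | cons x t ih =>
    cases t with
    | nil => simp [isInvalidItemAdjLoop]
    | cons y t =>
      have hp := List.pairwise_cons.mp hs
      have hxy : x ≤ y := hp.1 y (by simp)
      have hrest := ih hp.2
      by_cases hxyeq : x = y
      · simp [isInvalidItemAdjLoop, hxyeq]
      · have hlt : x < y := lt_of_le_of_ne hxy hxyeq
        have hxnot : x ∉ y :: t := by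
          intro hx
          rcases List.mem_cons.mp hx with h | h
          · exact hxyeq h
          · have hyz : y ≤ x := (List.pairwise_cons.mp hp.2).1 x h
            exact absurd (lt_of_lt_of_le hlt hyz) (lt_irrefl x)
        have hnd : (x :: y :: t).Nodup ↔ (y :: t).Nodup := by
          simp [List.nodup_cons, hxnot]
        have hbe : (x == y) = false := by simp [hxyeq]
        rw [show (x :: y :: t).zip (x :: y :: t).tail = (x, y) :: ((y :: t).zip t) by simp,
            show ((y :: t).zip t) = ((y :: t).zip (y :: t).tail) by rfl]
        simp only [isInvalidItemAdjLoop, hbe, Bool.false_eq_true, if_false, hrest, hnd]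

-- ===== VERDICT (by name: the statement is the Claim_ definition above) =====
theorem isInvalidItem_spec : Claim_equal_isInvalidItem := by
  intro checkItem _
  unfold Spec_isInvalidItem isInvalidItem isInvalidItem_alt
  set vals := checkItem.filter (fun v => !(v == ".")) with hv
  have hA : isInvalidItemLoop checkItem PySem.Set.empty =
      if vals.Nodup then none else some true := by
    simpa [PySem.Set.empty] using loop_eq checkItem PySem.Set.empty (by simp [PySem.Set.empty])
  have hsorted : (PySem.List.sorted vals (fun v => v) false).Pairwise (fun a b => a ≤ b) :=
    PySem.List.sorted_pairwise vals (fun v => v)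
  have hB := adj_eq (PySem.List.sorted vals (fun v => v) false) hsorted
  have hperm : (PySem.List.sorted vals (fun v => v) false).Perm vals :=
    PySem.List.sorted_perm vals (fun v => v) false
  have hnd : (PySem.List.sorted vals (fun v => v) false).Nodup ↔ vals.Nodup :=
    hperm.nodup_iff
  rw [hA]
  simp only [hB, hnd]
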